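-- pv_equiv track=rewrite | github.com/AxitTiwari/DSA-180 | Day47/contest/1.py | trimTrailingVowels
-- ===== SOURCE A (Python) =====
-- def trimTrailingVowels(s: str) -> str:
--     def isVowel(ch):
--         vowels = ["a", "e", "i", "o", "u"]
--         return True if ch in vowels else False
--
--     trimedS = ""
--     i = len(s) - 1
--
--     while i >= 0 and isVowel(s[i]):
--         i -= 1
--
--     return s[:i+1]
-- ===== SOURCE B (Python) =====
-- def trimTrailingVowels(s: str) -> str:
--     vowels = {"a", "e", "i", "o", "u"}
--     cut = 0
--     for i, ch in enumerate(s):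
--         if ch not in vowels:
--             cut = i + 1
--     return s[:cut]
-- ===== Notes on version B (the rewrite author's own statement) =====
-- stated objective: alternative
-- what changed: Replaces the backward while-loop over the suffix with a single forward enumerate pass that maintains a boundary index one past the last non-vowel and slices there.
import Mathlib
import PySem

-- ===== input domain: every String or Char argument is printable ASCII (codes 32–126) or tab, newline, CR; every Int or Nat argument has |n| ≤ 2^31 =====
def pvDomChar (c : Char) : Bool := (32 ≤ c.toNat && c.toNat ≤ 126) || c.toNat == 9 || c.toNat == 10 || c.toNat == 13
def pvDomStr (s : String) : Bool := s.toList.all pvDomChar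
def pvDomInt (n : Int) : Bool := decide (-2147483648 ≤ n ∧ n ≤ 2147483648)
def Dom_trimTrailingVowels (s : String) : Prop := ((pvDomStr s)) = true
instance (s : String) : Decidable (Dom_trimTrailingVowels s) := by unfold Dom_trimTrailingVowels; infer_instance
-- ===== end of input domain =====

-- B replaces A's backward suffix scan with a single forward pass maintaining a cut boundary (alternative decomposition, same cost).


-- ===== PORT A =====
-- A's helper isVowel: `ch in ["a","e","i","o","u"]`
def pvIsVowel (ch : Char) : Bool := decide (ch ∈ ['a', 'e', 'i', 'o', 'u'])

-- A's while loop `while i >= 0 and isVowel(s[i]): i -= 1`; the argument k is i+1,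
-- so the loop runs while k > 0 and s[k-1] is a vowel, and the result is the final i+1.
-- s[i] with 0 ≤ i < len never raises, so getD is exact here.
def pvTrimAux (l : List Char) : Nat → Nat
  | 0 => 0
  | k + 1 => if pvIsVowel (l.getD k ' ') then pvTrimAux l k else k + 1

def trimTrailingVowels (s : String) : String :=
  let l := s.toList
  -- return s[:i+1]
  String.ofList (PySem.List.slice l none (some ((pvTrimAux l l.length : Nat) : Int)))

-- ===== PORT B =====
def trimTrailingVowels_alt (s : String) : String :=
  let l := s.toList
  let cut := (PySem.List.enumerate l 0).foldl
    (fun cut p => if p.2 ∈ ['a', 'e', 'i', 'o', 'u'] then cut else p.1 + 1) 0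
  String.ofList (PySem.List.slice l none (some cut))

-- ===== PRECONDITION & SPEC =====
def Spec_trimTrailingVowels (s : String) (out : String) : Prop := out = trimTrailingVowels_alt s
instance (s : String) (out : String) : Decidable (Spec_trimTrailingVowels s out) := by unfold Spec_trimTrailingVowels; infer_instance

-- ===== CLAIM (what is proved, stated in full; the proofs are below) =====
def Claim_equal_trimTrailingVowels : Prop := ∀ (s : String), Dom_trimTrailingVowels s → Spec_trimTrailingVowels s (trimTrailingVowels s)

-- ===== LEMMAS AND PROOFS =====

-- appending past the scanned range does not change A's loop result
theorem pvTrimAux_append (l : List Char) (c : Char) :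
    ∀ k, k ≤ l.length → pvTrimAux (l ++ [c]) k = pvTrimAux l k := by
  intro k
  induction k with
  | zero => intro _; rfl
  | succ k ih =>
    intro hk
    have hk' : k < l.length := by omega
    have hget : (l ++ [c]).getD k ' ' = l.getD k ' ' := by
      simp [List.getD, List.getElem?_append_left hk']
    simp only [pvTrimAux, hget]
    rw [ih (by omega)]

-- B's fold abbreviation (proof-side only)
def pvCut (l : List Char) : Int :=
  (PySem.List.enumerate l 0).foldl
    (fun cut p => if p.2 ∈ ['a', 'e', 'i', 'o', 'u'] then cut else p.1 + 1) 0

theorem pvCut_snoc (l : List Char) (c : Char) :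
    pvCut (l ++ [c]) = if pvIsVowel c then pvCut l else (l.length : Int) + 1 := by
  simp [pvCut, PySem.List.enumerate_append, PySem.List.enumerate_cons,
    PySem.List.enumerate_nil, pvIsVowel]

theorem pvTrimAux_eq_pvCut (l : List Char) :
    ((pvTrimAux l l.length : Nat) : Int) = pvCut l := by
  induction l using List.reverseRecOn with
  | nil => rfl
  | append_singleton l c ih =>
    rw [pvCut_snoc]
    have hlen : (l ++ [c]).length = l.length + 1 := by simp
    rw [hlen]
    have hget : (l ++ [c]).getD l.length ' ' = c := by
      simp [List.getD]
    simp only [pvTrimAux, hget]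
    by_cases h : pvIsVowel c
    · simp only [h, if_true]
      rw [pvTrimAux_append l c l.length le_rfl, ih]
    · simp only [h]
      push_cast
      ring

-- ===== VERDICT (by name: the statement is the Claim_ definition above) =====
theorem trimTrailingVowels_spec : Claim_equal_trimTrailingVowels := by
  intro s _
  unfold Spec_trimTrailingVowels trimTrailingVowels trimTrailingVowels_alt
  simp only []
  rw [pvTrimAux_eq_pvCut]
  rfl
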